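-- pv_equiv track=rewrite | github.com/Jyotir10/Inference-Engine | Inference_Engine.py | make_DStandsent
-- ===== SOURCE A (Python) =====
-- def is_variable(x):
--     get_first_char = x[0]
--     if(get_first_char.islower()):
--         return True
--     else:
--         return False
--
-- def get_Stdvar(ip_varList,var_hm,subst_List,curr_position):
--     c = 0
--     for v in ip_varList:
--         if(is_variable(v)):
--             if v in var_hm:
--                 ip_varList[c] = var_hm[v]
--             else:
--                 pos = curr_position[0]
--                 ip_varList[c] = subst_List[pos]
--                 var_hm[v] = subst_List[pos]
--                 curr_position[0] += 1
--                 if curr_position[0] > 25: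
--                     curr_position[0] = 0
--         else:
--             ip_varList[c] = v
--         c += 1
--     return ip_varList
--
-- def make_DStandsent(x):
--     # x = list(x)
--     sentence_Set = set()
--     # list of predicates in a sentence that are tuples
--     var_hm = dict()
--     curr_position = [0, "currpos"]
--     subst_List = ["a", "b", "c", "d", "e", "f", "g", "h", "i", "j", "k", "l", "m", "n", "o", "p", "q", "r", "s", "t","u", "v", "w", "x", "y", "z"]
--     x  = sorted(x, key=lambda temp: (temp[0], temp[2], temp[1]))
--     for pred in x:
--         temp = list(pred)
--         pred_String = temp[0]
--         allVar = list(temp[1])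
--         is_Simp = temp[2]
--         new_var = get_Stdvar(allVar,var_hm,subst_List,curr_position)
--         # here I will get a new var list
--         new_tuple_Var = tuple(new_var)
--         new_predicate = (pred_String,new_tuple_Var,is_Simp)
--         sentence_Set.add(new_predicate)
--
--     sentence_Set = frozenset(sentence_Set)
--     return sentence_Set
-- ===== SOURCE B (Python) =====
-- def make_DStandsent(x):
--     subst_List = ["a", "b", "c", "d", "e", "f", "g", "h", "i", "j", "k", "l", "m",
--                   "n", "o", "p", "q", "r", "s", "t", "u", "v", "w", "x", "y", "z"]
--     preds = sorted(x, key=lambda temp: (temp[0], temp[2], temp[1]))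
--     # pass 1: build the whole variable-standardization map
--     var_hm = {}
--     pos = 0
--     for _, var_list, _ in preds:
--         for v in var_list:
--             if v[0].islower() and v not in var_hm:
--                 var_hm[v] = subst_List[pos]
--                 pos = 0 if pos >= 25 else pos + 1
--     # pass 2: rebuild each predicate with the finished map
--     out = set()
--     for name, var_list, is_simp in preds:
--         new_vars = tuple(var_hm[v] if v[0].islower() else v for v in var_list)
--         out.add((name, new_vars, is_simp))
--     return frozenset(out)
-- ===== Notes on version B (the rewrite author's own statement) =====
-- stated objective: alternative
-- what changed: A interleaves variable renaming with building the renaming dict in one stateful pass over the sorted predicates; B first builds the complete variable-standardization dict in one pass (same cyclic letter counter) and then rebuilds each predicate by a pure map applying the finished dict.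
import Mathlib
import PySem

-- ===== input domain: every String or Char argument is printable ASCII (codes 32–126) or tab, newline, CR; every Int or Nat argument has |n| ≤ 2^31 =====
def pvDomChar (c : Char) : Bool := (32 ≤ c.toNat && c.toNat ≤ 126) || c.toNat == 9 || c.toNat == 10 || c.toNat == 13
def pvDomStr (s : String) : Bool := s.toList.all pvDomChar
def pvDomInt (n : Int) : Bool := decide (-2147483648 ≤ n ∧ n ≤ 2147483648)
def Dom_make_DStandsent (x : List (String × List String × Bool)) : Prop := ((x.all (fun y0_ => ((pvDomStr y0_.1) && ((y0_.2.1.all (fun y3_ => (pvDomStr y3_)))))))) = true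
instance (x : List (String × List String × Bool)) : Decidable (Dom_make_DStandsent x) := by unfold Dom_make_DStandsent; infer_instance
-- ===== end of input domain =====

-- B replaces A's single pass that interleaves variable renaming with building the renaming dict
-- by two passes (build the whole dict first, then apply it); same cost, different decomposition.

-- Shared sort helper: both Pythons call the identical sorted(x, key=lambda t: (t[0], t[2], t[1])).
-- Ported by hand as a stable insertion sort (PySem.List.insertBy, the definition of
-- PySem.List.sorted) because the tuple key mixes String, Bool and List String; the
-- comparison below spells out Python's lexicographic tuple order (False < True for bools,
-- lexicographic for lists); exact on all inputs.
def pyListStrLt : List String → List String → Bool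
  | [], [] => false
  | [], _ :: _ => true
  | _ :: _, [] => false
  | a :: as, b :: bs => if a < b then true else if b < a then false else pyListStrLt as bs

def predKeyLt (p q : String × List String × Bool) : Bool :=
  if p.1 < q.1 then true
  else if q.1 < p.1 then false
  else if p.2.2 == q.2.2 then pyListStrLt p.2.1 q.2.1
  else (!p.2.2 && q.2.2)

def sortPreds (x : List (String × List String × Bool)) : List (String × List String × Bool) :=
  x.foldl (fun acc p => PySem.List.insertBy predKeyLt p acc) []

-- ===== PORT A =====
def is_variable (x : String) : Bool :=
  match x.toList with
  | [] => false            -- Python raises IndexError on x[0] here; excluded by Pre_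
  | c :: _ => PySem.Str.islower c

def get_Stdvar (ip_varList : List String) (var_hm : PySem.Dict String String)
    (subst_List : List String) (curr_position : Int) :
    List String × PySem.Dict String String × Int :=
  match ip_varList with
  | [] => ([], var_hm, curr_position)
  | v :: vs =>
    if is_variable v then
      match var_hm.get? v with
      | some w =>
        let r := get_Stdvar vs var_hm subst_List curr_position
        (w :: r.1, r.2)
      | none =>
        -- subst_List[pos]: pos is always kept in 0..25 by the wrap rule, so the default is never used
        let w := PySem.List.pyGetD subst_List curr_position ""
        let pos' := if curr_position + 1 > 25 then 0 else curr_position + 1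
        let r := get_Stdvar vs (var_hm.insert v w) subst_List pos'
        (w :: r.1, r.2)
    else
      let r := get_Stdvar vs var_hm subst_List curr_position
      (v :: r.1, r.2)

def make_DStandsent (x : List (String × List String × Bool)) : List (String × List String × Bool) :=
  let subst_List : List String := ["a", "b", "c", "d", "e", "f", "g", "h", "i", "j", "k", "l", "m",
    "n", "o", "p", "q", "r", "s", "t", "u", "v", "w", "x", "y", "z"]
  let xs := sortPreds x
  let r := xs.foldl
    (fun (st : PySem.Set (String × List String × Bool) × PySem.Dict String String × Int) pred =>
      let res := get_Stdvar pred.2.1 st.2.1 subst_List st.2.2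
      (PySem.Set.add st.1 (pred.1, res.1, pred.2.2), res.2))
    (PySem.Set.empty, PySem.Dict.empty, 0)
  r.1

-- ===== PORT B =====
def firstCharLower (v : String) : Bool :=
  ((v.toList.head?).map PySem.Str.islower).getD false   -- v[0].islower(); v = "" raises in Python, outside Pre_

def collectVars (var_hm : PySem.Dict String String) (pos : Int) (subst : List String) :
    List String → PySem.Dict String String × Int
  | [] => (var_hm, pos)
  | v :: vs =>
    if firstCharLower v && !(var_hm.contains v) then
      collectVars (var_hm.insert v (PySem.List.pyGetD subst pos ""))
        (if pos ≥ 25 then 0 else pos + 1) subst vs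
    else
      collectVars var_hm pos subst vs

def applyMap (var_hm : PySem.Dict String String) (vs : List String) : List String :=
  -- var_hm[v]: the key is always present after pass 1; rendered totally as getD v v
  vs.map (fun v => if firstCharLower v then var_hm.getD v v else v)

def make_DStandsent_alt (x : List (String × List String × Bool)) : List (String × List String × Bool) :=
  let subst_List : List String := ["a", "b", "c", "d", "e", "f", "g", "h", "i", "j", "k", "l", "m",
    "n", "o", "p", "q", "r", "s", "t", "u", "v", "w", "x", "y", "z"]
  let preds := sortPreds x
  let m := preds.foldl
    (fun (st : PySem.Dict String String × Int) pred => collectVars st.1 st.2 subst_List pred.2.1)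
    (PySem.Dict.empty, 0)
  preds.foldl
    (fun out pred => PySem.Set.add out (pred.1, applyMap m.1 pred.2.1, pred.2.2))
    PySem.Set.empty

-- ===== PRECONDITION & SPEC =====
-- Pre_ excludes inputs whose variable lists contain an empty string: there A (and B) raise
-- IndexError at v[0].
def Pre_make_DStandsent (x : List (String × List String × Bool)) : Prop :=
  ∀ p ∈ x, ∀ v ∈ p.2.1, v ≠ ""
instance (x : List (String × List String × Bool)) : Decidable (Pre_make_DStandsent x) := by
  unfold Pre_make_DStandsent; infer_instance

def pvWitness_make_DStandsent : (List (String × List String × Bool)) :=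
  [("Pred", ["x", "Konst", "y"], true), ("Pred", ["x"], false)]

def Spec_make_DStandsent (x : List (String × List String × Bool)) (out : List (String × List String × Bool)) : Prop := out = make_DStandsent_alt x
instance (x : List (String × List String × Bool)) (out : List (String × List String × Bool)) : Decidable (Spec_make_DStandsent x out) := by unfold Spec_make_DStandsent; infer_instance

-- ===== CLAIM (what is proved, stated in full; the proofs are below) =====
def Claim_equal_make_DStandsent : Prop := ∀ (x : List (String × List String × Bool)), Dom_make_DStandsent x → Pre_make_DStandsent x → Spec_make_DStandsent x (make_DStandsent x)

-- ===== LEMMAS AND PROOFS =====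

-- hm' contains every binding of hm (dicts only ever grow with fresh keys in these programs)
def DExt (hm hm' : PySem.Dict String String) : Prop :=
  ∀ k w, hm.get? k = some w → hm'.get? k = some w

theorem DExt_refl (hm : PySem.Dict String String) : DExt hm hm := fun _ _ h => h

theorem DExt_trans {a b c : PySem.Dict String String} (h1 : DExt a b) (h2 : DExt b c) : DExt a c :=
  fun k w h => h2 k w (h1 k w h)

theorem DExt_insert (hm : PySem.Dict String String) (v w : String) (hv : hm.contains v = false) :
    DExt hm (hm.insert v w) := by
  intro k u h
  rw [PySem.Dict.get?_insert]
  split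
  · next he =>
    subst he
    rw [PySem.Dict.contains_eq_isSome_get?, h] at hv
    simp at hv
  · exact h

theorem collectVars_ext (S : List String) :
    ∀ (vs : List String) (hm : PySem.Dict String String) (pos : Int),
      DExt hm (collectVars hm pos S vs).1 := by
  intro vs
  induction vs with
  | nil => intro hm pos; exact DExt_refl hm
  | cons v vs ih =>
    intro hm pos
    rw [collectVars]
    split
    · next hc =>
      have hcontains : hm.contains v = false := by
        cases h : hm.contains v
        · rfl
        · simp [h] at hc
      exact DExt_trans (DExt_insert hm v _ hcontains) (ih _ _)
    · exact ih hm pos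

theorem pass1_ext (S : List String) :
    ∀ (ys : List (String × List String × Bool)) (hm : PySem.Dict String String) (pos : Int),
      DExt hm ((ys.foldl
        (fun (st : PySem.Dict String String × Int) pred => collectVars st.1 st.2 S pred.2.1)
        (hm, pos)).1) := by
  intro ys
  induction ys with
  | nil => intro hm pos; exact DExt_refl hm
  | cons p ys ih =>
    intro hm pos
    simp only [List.foldl_cons]
    exact DExt_trans (collectVars_ext S p.2.1 hm pos)
      (by simpa using ih (collectVars hm pos S p.2.1).1 (collectVars hm pos S p.2.1).2)

theorem is_variable_eq_firstCharLower (v : String) : is_variable v = firstCharLower v := by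
  unfold is_variable firstCharLower
  cases v.toList <;> simp

-- per variable list: A's interleaved pass equals B's dict evolution plus B's mapping under any
-- dict extending the dict B has built after this list
theorem stdvar_eq (S : List String) :
    ∀ (vs : List String) (hm : PySem.Dict String String) (pos : Int)
      (hmF : PySem.Dict String String),
      DExt (collectVars hm pos S vs).1 hmF →
      get_Stdvar vs hm S pos = (applyMap hmF vs, collectVars hm pos S vs) := by
  intro vs
  induction vs with
  | nil => intro hm pos hmF _; simp [get_Stdvar, collectVars, applyMap]
  | cons v vs ih =>
    intro hm pos hmF hext
    by_cases hv : is_variable v = true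
    · have hfcl : firstCharLower v = true := is_variable_eq_firstCharLower v ▸ hv
      cases hget : hm.get? v with
      | some w =>
        have hcontains : hm.contains v = true := by
          rw [PySem.Dict.contains_eq_isSome_get?, hget]; rfl
        have hcond : (firstCharLower v && !(hm.contains v)) = false := by
          simp [hcontains]
        have hcoll : collectVars hm pos S (v :: vs) = collectVars hm pos S vs := by
          rw [collectVars, hcond]; simp
        rw [hcoll] at hext
        have hrec := ih hm pos hmF hext
        have hvF : hmF.get? v = some w :=
          hext v w (collectVars_ext S vs hm pos v w hget)
        rw [get_Stdvar, if_pos hv, hget, hcoll, hrec]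
        simp [applyMap, hfcl, PySem.Dict.getD, hvF]
      | none =>
        have hcontains : hm.contains v = false := by
          rw [PySem.Dict.contains_eq_isSome_get?, hget]; rfl
        have hcond : (firstCharLower v && !(hm.contains v)) = true := by
          simp [hcontains, hfcl]
        have hcoll : collectVars hm pos S (v :: vs)
            = collectVars (hm.insert v (PySem.List.pyGetD S pos ""))
                (if pos ≥ 25 then 0 else pos + 1) S vs := by
          rw [collectVars, hcond]; simp
        rw [hcoll] at hext
        have hrec := ih (hm.insert v (PySem.List.pyGetD S pos ""))
          (if pos ≥ 25 then 0 else pos + 1) hmF hext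
        have hvF : hmF.get? v = some (PySem.List.pyGetD S pos "") := by
          refine hext v _ ?_
          exact collectVars_ext S vs (hm.insert v (PySem.List.pyGetD S pos "")) _ v _ (by
            rw [PySem.Dict.get?_insert]; simp)
        rw [get_Stdvar, if_pos hv, hget, hcoll]
        rw [show (if pos + 1 > 25 then (0:Int) else pos + 1) = (if pos ≥ 25 then 0 else pos + 1) from by split_ifs <;> omega]
        simp [applyMap, hfcl, PySem.Dict.getD, hvF, hrec]
    · have hv' : is_variable v = false := by revert hv; cases is_variable v <;> simp
      have hfcl : firstCharLower v = false := is_variable_eq_firstCharLower v ▸ hv'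
      have hcond : (firstCharLower v && !(hm.contains v)) = false := by simp [hfcl]
      have hcoll : collectVars hm pos S (v :: vs) = collectVars hm pos S vs := by
        rw [collectVars, hcond]; simp
      rw [hcoll] at hext
      have hrec := ih hm pos hmF hext
      rw [get_Stdvar, if_neg (by simp [hv']), hcoll, hrec]
      simp [applyMap, hfcl]

-- the main folds agree: A's single interleaved fold versus B's second fold under any dict
-- extending what B's first fold produces from the same state
theorem fold_eq (S : List String) :
    ∀ (ys : List (String × List String × Bool))
      (acc : PySem.Set (String × List String × Bool))
      (hm : PySem.Dict String String) (pos : Int)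
      (hmF : PySem.Dict String String),
      DExt ((ys.foldl
        (fun (st : PySem.Dict String String × Int) pred => collectVars st.1 st.2 S pred.2.1)
        (hm, pos)).1) hmF →
      (ys.foldl
        (fun (st : PySem.Set (String × List String × Bool) × PySem.Dict String String × Int) pred =>
          let res := get_Stdvar pred.2.1 st.2.1 S st.2.2
          (PySem.Set.add st.1 (pred.1, res.1, pred.2.2), res.2))
        (acc, hm, pos)).1 =
      ys.foldl (fun out pred => PySem.Set.add out (pred.1, applyMap hmF pred.2.1, pred.2.2)) acc := by
  intro ys
  induction ys with
  | nil => intro acc hm pos hmF _; rfl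
  | cons p ys ih =>
    intro acc hm pos hmF hext
    simp only [List.foldl_cons] at hext ⊢
    have hext1 : DExt (collectVars hm pos S p.2.1).1 hmF := by
      refine DExt_trans ?_ hext
      have := pass1_ext S ys (collectVars hm pos S p.2.1).1 (collectVars hm pos S p.2.1).2
      simpa using this
    have hstd := stdvar_eq S p.2.1 hm pos hmF hext1
    simp only [hstd]
    exact ih (PySem.Set.add acc (p.1, applyMap hmF p.2.1, p.2.2))
      (collectVars hm pos S p.2.1).1 (collectVars hm pos S p.2.1).2 hmF (by simpa using hext)

-- ===== VERDICT (by name: the statement is the Claim_ definition above) =====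
theorem make_DStandsent_spec : Claim_equal_make_DStandsent := by
  intro x _ _
  unfold Spec_make_DStandsent make_DStandsent make_DStandsent_alt
  simp only []
  exact fold_eq _ (sortPreds x) PySem.Set.empty PySem.Dict.empty 0 _ (DExt_refl _)
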